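-- pv_equiv track=rewrite | github.com/daniel-reich/ubiquitous-fiesta | md4AF8HwJrhrhA5zm_20.py | colour_harmony
-- ===== SOURCE A (Python) =====
-- def colour_harmony(anchor, combination):
--   colours = ["red", "red-orange", "orange", "yellow-orange", "yellow", "yellow-green",  "green", "blue-green", "blue", "blue-violet", "violet", "red-violet"]
--   a = colours.index(anchor)
--   if combination=='complementary':
--     return set([anchor, colours[(a+6)%12]])
--   elif combination=='triadic':
--     return set([colours[i] for i in range(len(colours)) if not (i-a)%4])
--   elif combination=='square':
--     return set([colours[i] for i in range(len(colours)) if not (i-a)%3])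
--   elif combination=='analogous':
--     return set([colours[a-1], colours[a], colours[(a+1)%12]])
--   elif combination=='rectangle':
--     return set([colours[a],colours[(a+2)%12],colours[(a+6)%12],colours[(a+8)%12]])
--   return set([colours[a],colours[(a+5)%12],colours[(a+7)%12]])
-- ===== SOURCE B (Python) =====
-- def colour_harmony(anchor, combination):
--   colours = ["red", "red-orange", "orange", "yellow-orange", "yellow", "yellow-green", "green", "blue-green", "blue", "blue-violet", "violet", "red-violet"]
--   a = colours.index(anchor)
--   # each harmony = a starting spoke plus a walk around the wheel by relative intervals
--   start, intervals = {
--     'complementary': (a, [6]),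
--     'triadic': (a % 4, [4, 4]),
--     'square': (a % 3, [3, 3, 3]),
--     'analogous': (a - 1, [1, 1]),
--     'rectangle': (a, [2, 4, 2]),
--   }.get(combination, (a, [5, 2]))
--   i = start % 12
--   out = {colours[i]}
--   for step in intervals:
--     i = (i + step) % 12
--     out.add(colours[i])
--   return out
-- ===== Notes on version B (the rewrite author's own statement) =====
-- stated objective: alternative
-- what changed: A's six heterogeneous branch bodies (modular-filter comprehensions and hand-written absolute-offset lists) are replaced by one uniform mechanism: a table of (start spoke, relative interval steps) per combination and a single loop that walks a cursor around the wheel accumulating colours into the set.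
import Mathlib
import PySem

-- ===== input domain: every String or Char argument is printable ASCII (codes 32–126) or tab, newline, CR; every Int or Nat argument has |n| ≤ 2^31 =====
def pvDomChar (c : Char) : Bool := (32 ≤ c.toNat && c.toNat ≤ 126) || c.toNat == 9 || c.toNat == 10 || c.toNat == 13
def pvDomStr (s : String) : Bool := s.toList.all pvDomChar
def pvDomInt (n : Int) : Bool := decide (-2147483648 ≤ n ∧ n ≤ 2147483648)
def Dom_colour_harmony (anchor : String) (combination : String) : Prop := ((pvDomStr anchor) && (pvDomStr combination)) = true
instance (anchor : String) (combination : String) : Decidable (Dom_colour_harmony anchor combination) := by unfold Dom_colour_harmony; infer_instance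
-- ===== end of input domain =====

-- B replaces A's six heterogeneous branch bodies by a single cursor walk around the colour
-- wheel driven by a (start, relative-interval-list) table (objective: alternative; no speed claim).

-- the colour wheel, shared constant of both programs
def pvColours : List String := ["red", "red-orange", "orange", "yellow-orange", "yellow", "yellow-green", "green", "blue-green", "blue", "blue-violet", "violet", "red-violet"]

-- ===== PORT A =====
-- literal transliteration of A; colours.index raising ValueError is the `none` branch (excluded by Pre_)
def colour_harmony (anchor : String) (combination : String) : List String :=
  match PySem.List.index? pvColours anchor with
  | none => []  -- ValueError: outside Pre_
  | some a0 =>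
    let a : Int := a0
    if combination = "complementary" then
      PySem.Set.ofList [anchor, PySem.List.pyGetD pvColours (PySem.Int.mod (a + 6) 12) ""]
    else if combination = "triadic" then
      PySem.Set.ofList (((PySem.List.pyRange 0 (pvColours.length : Int) 1).filter
        (fun i => PySem.Int.mod (i - a) 4 == 0)).map (fun i => PySem.List.pyGetD pvColours i ""))
    else if combination = "square" then
      PySem.Set.ofList (((PySem.List.pyRange 0 (pvColours.length : Int) 1).filter
        (fun i => PySem.Int.mod (i - a) 3 == 0)).map (fun i => PySem.List.pyGetD pvColours i ""))
    else if combination = "analogous" then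
      PySem.Set.ofList [PySem.List.pyGetD pvColours (a - 1) "", PySem.List.pyGetD pvColours a "",
        PySem.List.pyGetD pvColours (PySem.Int.mod (a + 1) 12) ""]
    else if combination = "rectangle" then
      PySem.Set.ofList [PySem.List.pyGetD pvColours a "", PySem.List.pyGetD pvColours (PySem.Int.mod (a + 2) 12) "",
        PySem.List.pyGetD pvColours (PySem.Int.mod (a + 6) 12) "", PySem.List.pyGetD pvColours (PySem.Int.mod (a + 8) 12) ""]
    else
      PySem.Set.ofList [PySem.List.pyGetD pvColours a "", PySem.List.pyGetD pvColours (PySem.Int.mod (a + 5) 12) "",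
        PySem.List.pyGetD pvColours (PySem.Int.mod (a + 7) 12) ""]

-- ===== PORT B =====
-- literal transliteration of Source B: harmony = start spoke + walk by relative intervals
def colour_harmony_alt (anchor : String) (combination : String) : List String :=
  match PySem.List.index? pvColours anchor with
  | none => []  -- ValueError: outside Pre_
  | some a0 =>
    let a : Int := a0
    let p : Int × List Int :=
      PySem.Dict.getD (PySem.Dict.ofList
        [("complementary", (a, ([6] : List Int))),
         ("triadic", (PySem.Int.mod a 4, ([4, 4] : List Int))),
         ("square", (PySem.Int.mod a 3, ([3, 3, 3] : List Int))),
         ("analogous", (a - 1, ([1, 1] : List Int))),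
         ("rectangle", (a, ([2, 4, 2] : List Int)))])
        combination (a, ([5, 2] : List Int))
    let i0 : Int := PySem.Int.mod p.1 12
    let st : List String × Int := p.2.foldl
      (fun (s : List String × Int) step =>
        let i := PySem.Int.mod (s.2 + step) 12
        (PySem.Set.add s.1 (PySem.List.pyGetD pvColours i ""), i))
      (PySem.Set.add PySem.Set.empty (PySem.List.pyGetD pvColours i0 ""), i0)
    st.1

-- ===== PRECONDITION & SPEC =====
-- Pre_ excludes exactly the anchors not on the colour wheel, on which A raises ValueError.
def Pre_colour_harmony (anchor : String) (combination : String) : Prop :=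
  anchor ∈ ["red", "red-orange", "orange", "yellow-orange", "yellow", "yellow-green", "green", "blue-green", "blue", "blue-violet", "violet", "red-violet"]
instance (anchor : String) (combination : String) : Decidable (Pre_colour_harmony anchor combination) := by unfold Pre_colour_harmony; infer_instance

def pvWitness_colour_harmony : String × String := ("red", "triadic")

def Spec_colour_harmony (anchor : String) (combination : String) (out : List String) : Prop := out = colour_harmony_alt anchor combination
instance (anchor : String) (combination : String) (out : List String) : Decidable (Spec_colour_harmony anchor combination out) := by unfold Spec_colour_harmony; infer_instance

-- ===== CLAIM (what is proved, stated in full; the proofs are below) =====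
def Claim_equal_colour_harmony : Prop := ∀ (anchor : String) (combination : String), Dom_colour_harmony anchor combination → Pre_colour_harmony anchor combination → Spec_colour_harmony anchor combination (colour_harmony anchor combination)

-- ===== LEMMAS AND PROOFS =====

-- an unknown combination falls through B's walk table to the default (a, [5, 2])
theorem pvWalkTable_getD_default (a : Int) (c : String)
    (h1 : ¬ c = "complementary") (h2 : ¬ c = "triadic") (h3 : ¬ c = "square")
    (h4 : ¬ c = "analogous") (h5 : ¬ c = "rectangle") :
    PySem.Dict.getD (PySem.Dict.ofList
        [("complementary", (a, ([6] : List Int))),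
         ("triadic", (PySem.Int.mod a 4, ([4, 4] : List Int))),
         ("square", (PySem.Int.mod a 3, ([3, 3, 3] : List Int))),
         ("analogous", (a - 1, ([1, 1] : List Int))),
         ("rectangle", (a, ([2, 4, 2] : List Int)))])
      c (a, ([5, 2] : List Int)) = (a, ([5, 2] : List Int)) := by
  have g1 : ¬ "complementary" = c := fun h => h1 h.symm
  have g2 : ¬ "triadic" = c := fun h => h2 h.symm
  have g3 : ¬ "square" = c := fun h => h3 h.symm
  have g4 : ¬ "analogous" = c := fun h => h4 h.symm
  have g5 : ¬ "rectangle" = c := fun h => h5 h.symm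
  simp [PySem.Dict.ofList, PySem.Dict.update, PySem.Dict.getD_insert, PySem.Dict.getD_empty,
    h1, h2, h3, h4, h5]

-- ===== VERDICT (by name: the statement is the Claim_ definition above) =====
theorem colour_harmony_spec : Claim_equal_colour_harmony := by
  intro anchor combination _ hp
  unfold Pre_colour_harmony at hp
  unfold Spec_colour_harmony
  by_cases h1 : combination = "complementary"
  · subst h1; fin_cases hp <;> decide
  by_cases h2 : combination = "triadic"
  · subst h2; fin_cases hp <;> decide
  by_cases h3 : combination = "square"
  · subst h3; fin_cases hp <;> decide
  by_cases h4 : combination = "analogous"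
  · subst h4; fin_cases hp <;> decide
  by_cases h5 : combination = "rectangle"
  · subst h5; fin_cases hp <;> decide
  · have e : ∀ a : Int, PySem.Dict.getD (PySem.Dict.ofList
        [("complementary", (a, ([6] : List Int))),
         ("triadic", (PySem.Int.mod a 4, ([4, 4] : List Int))),
         ("square", (PySem.Int.mod a 3, ([3, 3, 3] : List Int))),
         ("analogous", (a - 1, ([1, 1] : List Int))),
         ("rectangle", (a, ([2, 4, 2] : List Int)))])
        combination (a, ([5, 2] : List Int)) = (a, ([5, 2] : List Int)) :=
      fun a => pvWalkTable_getD_default a combination h1 h2 h3 h4 h5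
    fin_cases hp <;>
      simp only [colour_harmony, colour_harmony_alt, h1, h2, h3, h4, h5, if_false, e] <;>
      decide
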